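-- pv_equiv track=rewrite | github.com/KNIFE-Framework/knifes_overview | core/scripts/tools/new_q12.py | _render_fm
-- ===== SOURCE A (Python) =====
-- def _render_fm(fm_core_lines, title: str, explicit_id: str | None) -> str:
--     lines = []
--     in_fm = False
--     for raw in fm_core_lines:
--         line = raw.rstrip("\n")
--
--         if line.strip() == "---" and not in_fm:
--             in_fm = True
--             lines.append(line)
--             continue
--         if line.strip() == "---" and in_fm:
--             lines.append(line)
--             break
--
--         line = line.replace("{{TITLE}}", title)
--         if explicit_id:
--             line = line.replace("{{ID}}", explicit_id)
--
--         lines.append(line)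
--
--     return "\n".join(lines) + "\n"
-- ===== SOURCE B (Python) =====
-- def _substitute(line, title, explicit_id):
--     line = line.replace("{{TITLE}}", title)
--     if explicit_id:
--         line = line.replace("{{ID}}", explicit_id)
--     return line
--
--
-- def _render_fm(fm_core_lines, title: str, explicit_id: str | None) -> str:
--     stripped = [raw.rstrip("\n") for raw in fm_core_lines]
--     fences = [i for i, l in enumerate(stripped) if l.strip() == "---"]
--     work = stripped[: fences[1] + 1] if len(fences) >= 2 else stripped
--     out = [l if l.strip() == "---" else _substitute(l, title, explicit_id)
--            for l in work]
--     return "\n".join(out) + "\n"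
-- ===== Notes on version B (the rewrite author's own statement) =====
-- stated objective: alternative
-- what changed: Replaced A's single stateful loop (in_fm flag plus break) by a two-pass decomposition: rstrip all lines, collect the indices of '---' fence lines, slice the list up to and including the second fence if present, then map the substitution over non-fence lines and join.
import Mathlib
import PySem

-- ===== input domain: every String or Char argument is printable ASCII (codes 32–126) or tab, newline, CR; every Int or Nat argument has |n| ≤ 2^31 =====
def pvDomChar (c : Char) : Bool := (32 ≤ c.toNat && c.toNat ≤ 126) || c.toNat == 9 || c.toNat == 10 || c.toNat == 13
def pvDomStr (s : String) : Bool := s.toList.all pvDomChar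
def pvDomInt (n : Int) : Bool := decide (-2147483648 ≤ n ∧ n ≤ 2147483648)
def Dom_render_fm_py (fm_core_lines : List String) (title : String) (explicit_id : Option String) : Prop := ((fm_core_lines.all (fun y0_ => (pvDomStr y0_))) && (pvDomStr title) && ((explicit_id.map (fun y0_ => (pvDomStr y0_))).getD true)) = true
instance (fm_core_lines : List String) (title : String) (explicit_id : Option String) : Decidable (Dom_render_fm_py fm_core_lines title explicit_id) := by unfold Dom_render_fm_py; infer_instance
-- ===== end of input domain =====

-- B replaces A's flag+break loop by two passes (collect the fence indices, slice to the
-- second fence, then map the substitution over the slice); objective: alternative decomposition.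

-- ===== PORT A =====
-- shared helpers: both Pythons evaluate these identical sub-expressions
-- exact port of raw.rstrip("\n"): drop trailing '\n' characters
def pvRstripNL (s : String) : String :=
  String.ofList ((s.toList.reverse.dropWhile (fun c => c == '\n')).reverse)

def pvIsFence (s : String) : Bool := PySem.Str.strip s == "---"

-- line.replace("{{TITLE}}", title) then, if explicit_id is truthy, .replace("{{ID}}", explicit_id)
def pvSubst (line : String) (title : String) (explicit_id : Option String) : String :=
  let l1 := PySem.Str.replace line "{{TITLE}}" title
  match explicit_id with
  | some s => if s = "" then l1 else PySem.Str.replace l1 "{{ID}}" s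
  | none => l1

-- A's for-loop with the in_fm flag; the 'break' returns the singleton tail
def pvALoop (title : String) (explicit_id : Option String) :
    List String → Bool → List String
  | [], _ => []
  | raw :: rest, in_fm =>
    let line := pvRstripNL raw
    if pvIsFence line && !in_fm then line :: pvALoop title explicit_id rest true
    else if pvIsFence line && in_fm then [line]
    else pvSubst line title explicit_id :: pvALoop title explicit_id rest in_fm

def render_fm_py (fm_core_lines : List String) (title : String) (explicit_id : Option String) : String :=
  PySem.Str.join "\n" (pvALoop title explicit_id fm_core_lines false) ++ "\n"

-- ===== PORT B =====
-- [i for i, l in enumerate(stripped) if l.strip() == "---"]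
def pvBFences (stripped : List String) : List Int :=
  ((PySem.List.enumerate stripped 0).filter (fun p => pvIsFence p.2)).map (fun p => p.1)

def render_fm_py_alt (fm_core_lines : List String) (title : String) (explicit_id : Option String) : String :=
  let stripped := fm_core_lines.map pvRstripNL
  let fences := pvBFences stripped
  let work := match fences with
    | _ :: j :: _ => PySem.List.slice stripped none (some (j + 1))  -- stripped[: fences[1] + 1]
    | _ => stripped
  let out := work.map (fun l => if pvIsFence l then l else pvSubst l title explicit_id)
  PySem.Str.join "\n" out ++ "\n"

-- ===== PRECONDITION & SPEC =====
def Spec_render_fm_py (fm_core_lines : List String) (title : String) (explicit_id : Option String) (out : String) : Prop := out = render_fm_py_alt fm_core_lines title explicit_id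
instance (fm_core_lines : List String) (title : String) (explicit_id : Option String) (out : String) : Decidable (Spec_render_fm_py fm_core_lines title explicit_id out) := by unfold Spec_render_fm_py; infer_instance

-- ===== CLAIM (what is proved, stated in full; the proofs are below) =====
def Claim_equal_render_fm_py : Prop := ∀ (fm_core_lines : List String) (title : String) (explicit_id : Option String), Dom_render_fm_py fm_core_lines title explicit_id → Spec_render_fm_py fm_core_lines title explicit_id (render_fm_py fm_core_lines title explicit_id)

-- ===== LEMMAS AND PROOFS =====

-- fence positions as Nat indices, recursively
def pvFenceIdxs : List String → List Nat
  | [] => []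
  | l :: t =>
    if pvIsFence l then 0 :: (pvFenceIdxs t).map (· + 1)
    else (pvFenceIdxs t).map (· + 1)

-- prefix of the list up to (and including) the FIRST fence, resp. the SECOND fence
def pvCut1 : List String → List String
  | [] => []
  | l :: t => if pvIsFence l then [l] else l :: pvCut1 t

def pvCut2 : List String → List String
  | [] => []
  | l :: t => if pvIsFence l then l :: pvCut1 t else l :: pvCut2 t

def pvG (xs : List String) (s : Int) : List Int :=
  ((PySem.List.enumerate xs s).filter (fun p => pvIsFence p.2)).map (fun p => p.1)

theorem pvG_cons (l : String) (t : List String) (s : Int) :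
    pvG (l :: t) s = (if pvIsFence l then [s] else []) ++ pvG t (s + 1) := by
  by_cases h : pvIsFence l <;> simp [pvG, PySem.List.enumerate_cons, h]

theorem pvG_eq (xs : List String) : ∀ s : Int,
    pvG xs s = (pvFenceIdxs xs).map (fun k : Nat => s + (k : Int)) := by
  induction xs with
  | nil => intro s; simp [pvG, PySem.List.enumerate_nil, pvFenceIdxs]
  | cons l t ih =>
    intro s
    rw [pvG_cons, ih (s + 1)]
    have hmap : List.map (fun k : Nat => s + 1 + (k : Int)) (pvFenceIdxs t)
        = List.map (fun k : Nat => s + (k : Int)) ((pvFenceIdxs t).map (· + 1)) := by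
      rw [List.map_map]
      exact List.map_congr_left (fun k _ => by simp only [Function.comp_apply]; push_cast; ring)
    by_cases h : pvIsFence l
    · have he : pvFenceIdxs (l :: t) = 0 :: (pvFenceIdxs t).map (· + 1) := by
        simp [pvFenceIdxs, h]
      rw [he]
      simp only [h, if_true, List.map_cons, List.singleton_append]
      rw [← hmap]
      simp
    · have he : pvFenceIdxs (l :: t) = (pvFenceIdxs t).map (· + 1) := by
        simp [pvFenceIdxs, h]
      rw [he]
      simp only [h, if_false, Bool.false_eq_true, List.nil_append]
      rw [← hmap]

theorem pvBFences_eq (xs : List String) :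
    pvBFences xs = (pvFenceIdxs xs).map (fun k : Nat => (k : Int)) := by
  have h := pvG_eq xs 0
  simpa [pvG, pvBFences] using h

theorem pv_no_fence_of_nil : ∀ t : List String, pvFenceIdxs t = [] →
    ∀ x ∈ t, pvIsFence x = false := by
  intro t
  induction t with
  | nil => simp
  | cons l t ih =>
    intro h x hx
    by_cases hl : pvIsFence l
    · simp [pvFenceIdxs, hl] at h
    · simp [pvFenceIdxs, hl, List.map_eq_nil_iff] at h
      rcases List.mem_cons.1 hx with rfl | hx
      · simpa using hl
      · exact ih h x hx

theorem pvCut1_of_no_fence : ∀ t : List String,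
    (∀ x ∈ t, pvIsFence x = false) → pvCut1 t = t := by
  intro t
  induction t with
  | nil => simp [pvCut1]
  | cons l t ih =>
    intro h
    have hl : pvIsFence l = false := h l (by simp)
    simp [pvCut1, hl]
    exact ih (fun x hx => h x (by simp [hx]))

theorem pvCut2_of_short : ∀ t : List String,
    (pvFenceIdxs t).length ≤ 1 → pvCut2 t = t := by
  intro t
  induction t with
  | nil => simp [pvCut2]
  | cons l t ih =>
    intro h
    by_cases hl : pvIsFence l
    · have he : pvFenceIdxs (l :: t) = 0 :: (pvFenceIdxs t).map (· + 1) := by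
        simp [pvFenceIdxs, hl]
      rw [he] at h
      have hnil : pvFenceIdxs t = [] := by
        rcases hF : pvFenceIdxs t with _ | ⟨a, b⟩
        · rfl
        · rw [hF, List.map_cons] at h
          simp only [List.length_cons] at h
          omega
      simp [pvCut2, hl]
      exact pvCut1_of_no_fence t (pv_no_fence_of_nil t hnil)
    · have h' : (pvFenceIdxs t).length ≤ 1 := by
        simpa [pvFenceIdxs, hl] using h
      simp [pvCut2, hl, ih h']

theorem pvCut1_take : ∀ (t : List String) (j : Nat) (r : List Nat),
    pvFenceIdxs t = j :: r → pvCut1 t = t.take (j + 1) := by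
  intro t
  induction t with
  | nil => intro j r h; simp [pvFenceIdxs] at h
  | cons l t ih =>
    intro j r h
    by_cases hl : pvIsFence l
    · simp [pvFenceIdxs, hl] at h
      obtain ⟨rfl, -⟩ := h
      simp [pvCut1, hl]
    · rw [pvFenceIdxs, if_neg hl] at h
      rcases hF : pvFenceIdxs t with _ | ⟨j', r'⟩
      · rw [hF] at h; simp at h
      · rw [hF] at h
        simp at h
        obtain ⟨rfl, -⟩ := h
        simp [pvCut1, hl, ih j' r' hF, List.take_succ_cons]

theorem pvCut2_take : ∀ (t : List String) (j0 j1 : Nat) (r : List Nat),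
    pvFenceIdxs t = j0 :: j1 :: r → pvCut2 t = t.take (j1 + 1) := by
  intro t
  induction t with
  | nil => intro j0 j1 r h; simp [pvFenceIdxs] at h
  | cons l t ih =>
    intro j0 j1 r h
    by_cases hl : pvIsFence l
    · rw [pvFenceIdxs, if_pos hl] at h
      rcases hF : pvFenceIdxs t with _ | ⟨j', r'⟩
      · rw [hF] at h; simp at h
      · rw [hF] at h
        simp at h
        obtain ⟨-, rfl, -⟩ := h
        simp [pvCut2, hl, pvCut1_take t j' r' hF, List.take_succ_cons]
    · rw [pvFenceIdxs, if_neg hl] at h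
      rcases hF : pvFenceIdxs t with _ | ⟨j0', F'⟩
      · rw [hF] at h; simp at h
      · rcases F' with _ | ⟨j1', r''⟩
        · rw [hF] at h; simp at h
        · rw [hF] at h
          simp at h
          obtain ⟨-, rfl, -⟩ := h
          simp [pvCut2, hl, ih j0' j1' r'' hF, List.take_succ_cons]

theorem pvBWork_eq (xs : List String) :
    (match pvBFences xs with
     | _ :: j :: _ => PySem.List.slice xs none (some (j + 1))
     | _ => xs) = pvCut2 xs := by
  rw [pvBFences_eq]
  rcases h : pvFenceIdxs xs with _ | ⟨j0, F'⟩
  · exact (pvCut2_of_short xs (by simp [h])).symm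
  · rcases F' with _ | ⟨j1, r⟩
    · exact (pvCut2_of_short xs (by simp [h])).symm
    · show PySem.List.slice xs none (some ((j1 : Int) + 1)) = pvCut2 xs
      rw [PySem.List.slice_to xs (by positivity)]
      have hto : ((j1 : Int) + 1).toNat = j1 + 1 := by omega
      rw [hto, pvCut2_take xs j0 j1 r h]

theorem pvALoop_true (title : String) (explicit_id : Option String) :
    ∀ raws : List String, pvALoop title explicit_id raws true =
      (pvCut1 (raws.map pvRstripNL)).map
        (fun l => if pvIsFence l then l else pvSubst l title explicit_id) := by
  intro raws
  induction raws with
  | nil => simp [pvALoop, pvCut1]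
  | cons raw t ih =>
    by_cases h : pvIsFence (pvRstripNL raw) <;>
      simp [pvALoop, pvCut1, h, ih]

theorem pvALoop_false (title : String) (explicit_id : Option String) :
    ∀ raws : List String, pvALoop title explicit_id raws false =
      (pvCut2 (raws.map pvRstripNL)).map
        (fun l => if pvIsFence l then l else pvSubst l title explicit_id) := by
  intro raws
  induction raws with
  | nil => simp [pvALoop, pvCut2]
  | cons raw t ih =>
    by_cases h : pvIsFence (pvRstripNL raw) <;>
      simp [pvALoop, pvCut2, h, ih, pvALoop_true]

-- ===== VERDICT (by name: the statement is the Claim_ definition above) =====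
theorem render_fm_py_spec : Claim_equal_render_fm_py := by
  intro fm_core_lines title explicit_id _
  unfold Spec_render_fm_py
  have hb : render_fm_py_alt fm_core_lines title explicit_id =
      PySem.Str.join "\n"
        ((match pvBFences (fm_core_lines.map pvRstripNL) with
          | _ :: j :: _ => PySem.List.slice (fm_core_lines.map pvRstripNL) none (some (j + 1))
          | _ => fm_core_lines.map pvRstripNL).map
          (fun l => if pvIsFence l then l else pvSubst l title explicit_id)) ++ "\n" := rfl
  rw [render_fm_py, hb, pvBWork_eq, pvALoop_false]
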